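-- pv_equiv track=rewrite | github.com/SiaAnalyst/Python-simple-tasks | Packages/ex_11.py | sequence_buttons
-- ===== SOURCE A (Python) =====
-- def sequence_buttons(string):
--     dict = {
--         '1':'.,?!:',
--         '2':'ABC',
--         '3':'DEF',
--         '4':'GHI',
--         '5':'JKL',
--         '6':'MNO',
--         '7':'PQRS',
--         '8':'TUV',
--         '9':'WXYZ',
--         '0': ' '}
--     string = string.upper()
--     result = ''
--     for i in string:
--         for j in dict.values():
--             if i in j:
--                 count = j.index(i)+1
--                 for k, v in dict.items():
--                     if v == j:
--                         result += k*count
--     return result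
-- ===== SOURCE B (Python) =====
-- def sequence_buttons(string):
--     keypad = {
--         '1': '.,?!:',
--         '2': 'ABC',
--         '3': 'DEF',
--         '4': 'GHI',
--         '5': 'JKL',
--         '6': 'MNO',
--         '7': 'PQRS',
--         '8': 'TUV',
--         '9': 'WXYZ',
--         '0': ' '}
--     table = {}
--     for k, s in keypad.items():
--         for idx, c in enumerate(s):
--             table[c] = k * (idx + 1)
--     return ''.join(table.get(c, '') for c in string.upper())
-- ===== Notes on version B (the rewrite author's own statement) =====
-- stated objective: faster
-- what changed: A scans every keypad group per character, finds the index inside it, and re-scans the dict items for the key; B builds one reverse lookup table (char -> press sequence) from the keypad once and then maps each character of the upper-cased input through a single table lookup.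
import Mathlib
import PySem

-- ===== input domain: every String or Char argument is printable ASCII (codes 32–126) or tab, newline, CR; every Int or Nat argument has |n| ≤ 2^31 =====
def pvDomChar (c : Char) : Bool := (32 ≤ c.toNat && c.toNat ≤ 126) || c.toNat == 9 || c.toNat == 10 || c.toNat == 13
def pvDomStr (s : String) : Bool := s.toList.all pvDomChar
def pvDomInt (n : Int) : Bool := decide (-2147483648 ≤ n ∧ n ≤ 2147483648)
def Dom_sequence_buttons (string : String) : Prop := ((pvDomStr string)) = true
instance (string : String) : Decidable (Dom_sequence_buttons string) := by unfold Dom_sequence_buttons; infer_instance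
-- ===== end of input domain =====

-- B replaces A's per-character nested scans (group search, index search, key re-scan)
-- by a reverse lookup table built once from the keypad, then a single lookup pass (measured faster in a timing run).

-- ===== PORT A =====
-- A's dict literal (insertion order preserved).
def pvDictA : PySem.Dict String String :=
  PySem.Dict.ofList [("1", ".,?!:"), ("2", "ABC"), ("3", "DEF"), ("4", "GHI"),
    ("5", "JKL"), ("6", "MNO"), ("7", "PQRS"), ("8", "TUV"), ("9", "WXYZ"), ("0", " ")]

-- Transliteration of A: result accumulates over the chars of string.upper(); for each
-- char i, scan dict.values() for groups containing it ('i in j' with i a single char =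
-- PySem.Chars.isIn [i]), count = j.index(i)+1 (= PySem.Chars.find, guarded by isIn so
-- it is nonnegative), then re-scan dict.items() for the key of that group; 'k*count'
-- (Python str*int) is (List.replicate count k.toList).flatten — exact for count ≥ 0.
def sequence_buttons (string : String) : String :=
  let dict := pvDictA
  let s := PySem.Str.upper string
  String.ofList <| s.toList.foldl (fun result i =>
    dict.values.foldl (fun result j =>
      if PySem.Chars.isIn [i] j.toList then
        let count := (PySem.Chars.find j.toList [i]).toNat + 1
        dict.items.foldl (fun result kv =>
          if kv.2 == j then result ++ (List.replicate count kv.1.toList).flatten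
          else result) result
      else result) result) []

-- ===== PORT B =====
-- B's keypad dict literal (same data, B's own definition).
def pvKeypadB : PySem.Dict String String :=
  PySem.Dict.ofList [("1", ".,?!:"), ("2", "ABC"), ("3", "DEF"), ("4", "GHI"),
    ("5", "JKL"), ("6", "MNO"), ("7", "PQRS"), ("8", "TUV"), ("9", "WXYZ"), ("0", " ")]

-- B's reverse table: for k, s in keypad.items(): for idx, c in enumerate(s): table[c] = k*(idx+1).
def pvTableB : PySem.Dict Char String :=
  pvKeypadB.items.foldl (fun table ks =>
    (PySem.List.enumerate ks.2.toList).foldl (fun table ic =>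
      table.insert ic.2 (String.ofList (List.replicate (ic.1.toNat + 1) ks.1.toList).flatten))
      table)
    PySem.Dict.empty

-- ''.join(table.get(c, '') for c in string.upper())
def sequence_buttons_alt (string : String) : String :=
  PySem.Str.join "" ((PySem.Str.upper string).toList.map (fun c => (pvTableB.get? c).getD ""))

-- ===== PRECONDITION & SPEC =====
def Spec_sequence_buttons (string : String) (out : String) : Prop := out = sequence_buttons_alt string
instance (string : String) (out : String) : Decidable (Spec_sequence_buttons string out) := by unfold Spec_sequence_buttons; infer_instance

-- ===== CLAIM (what is proved, stated in full; the proofs are below) =====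
def Claim_equal_sequence_buttons : Prop := ∀ (string : String), Dom_sequence_buttons string → Spec_sequence_buttons string (sequence_buttons string)

-- ===== LEMMAS AND PROOFS =====

-- A's per-character chunk, in flatMap form: what one iteration of A's outer loop appends.
def pvChunkA (i : Char) : List Char :=
  pvDictA.values.flatMap (fun j =>
    if PySem.Chars.isIn [i] j.toList then
      pvDictA.items.flatMap (fun kv =>
        if kv.2 == j then (List.replicate ((PySem.Chars.find j.toList [i]).toNat + 1) kv.1.toList).flatten
        else [])
    else [])

lemma pvValuesA : pvDictA.values = [".,?!:", "ABC", "DEF", "GHI", "JKL", "MNO", "PQRS", "TUV", "WXYZ", " "] := by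
  decide

lemma pvItemsA : pvDictA.items = [("1", ".,?!:"), ("2", "ABC"), ("3", "DEF"), ("4", "GHI"),
    ("5", "JKL"), ("6", "MNO"), ("7", "PQRS"), ("8", "TUV"), ("9", "WXYZ"), ("0", " ")] := by
  decide

set_option maxRecDepth 100000 in
lemma pvTableBLit : pvTableB = PySem.Dict.mk [('.', "1"), (',', "11"), ('?', "111"), ('!', "1111"), (':', "11111"), ('A', "2"), ('B', "22"), ('C', "222"), ('D', "3"), ('E', "33"), ('F', "333"), ('G', "4"), ('H', "44"), ('I', "444"), ('J', "5"), ('K', "55"), ('L', "555"), ('M', "6"), ('N', "66"), ('O', "666"), ('P', "7"), ('Q', "77"), ('R', "777"), ('S', "7777"), ('T', "8"), ('U', "88"), ('V', "888"), ('W', "9"), ('X', "99"), ('Y', "999"), ('Z', "9999"), (' ', "0")] := by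
  decide

-- One iteration of A's outer loop only appends pvChunkA i to the running result.
lemma pvStepA (res : List Char) (i : Char) :
    pvDictA.values.foldl (fun result j =>
      if PySem.Chars.isIn [i] j.toList then
        pvDictA.items.foldl (fun result kv =>
          if kv.2 == j then result ++ (List.replicate ((PySem.Chars.find j.toList [i]).toNat + 1) kv.1.toList).flatten
          else result) result
      else result) res = res ++ pvChunkA i := by
  have inner : ∀ (j : String) (acc : List Char),
      pvDictA.items.foldl (fun result kv =>
        if kv.2 == j then result ++ (List.replicate ((PySem.Chars.find j.toList [i]).toNat + 1) kv.1.toList).flatten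
        else result) acc
      = acc ++ pvDictA.items.flatMap (fun kv =>
          if kv.2 == j then (List.replicate ((PySem.Chars.find j.toList [i]).toNat + 1) kv.1.toList).flatten
          else []) := by
    intro j acc
    rw [PySem.List.foldl_congr_mem _ _
        (fun result kv => result ++ (if kv.2 == j then (List.replicate ((PySem.Chars.find j.toList [i]).toNat + 1) kv.1.toList).flatten else []))
        acc (by intro a kv _; by_cases h : kv.2 == j <;> simp [h]),
      PySem.List.foldl_append_eq_flatMap]
  rw [PySem.List.foldl_congr_mem _ _
      (fun result j => result ++ (if PySem.Chars.isIn [i] j.toList then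
        pvDictA.items.flatMap (fun kv =>
          if kv.2 == j then (List.replicate ((PySem.Chars.find j.toList [i]).toNat + 1) kv.1.toList).flatten
          else [])
        else []))
      res (by
        intro acc j _
        by_cases h : PySem.Chars.isIn [i] j.toList
        · simp only [if_pos h]; exact inner j acc
        · simp only [if_neg h]; simp),
    PySem.List.foldl_append_eq_flatMap, pvChunkA]

set_option maxRecDepth 100000 in
set_option maxHeartbeats 2000000 in
-- Per character, A's chunk equals B's table lookup.
lemma pvPerChar (c : Char) : pvChunkA c = ((pvTableB.get? c).getD "").toList := by
  have hni : ∀ l : List Char, c ∉ l → PySem.Chars.isIn [c] l = false := fun l h => by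
    rw [PySem.Chars.isIn_eq_false_iff]
    exact fun hin => h (hin.subset (List.mem_singleton_self c))
  by_cases h0 : c = '.'
  · subst h0; decide
  by_cases h1 : c = ','
  · subst h1; decide
  by_cases h2 : c = '?'
  · subst h2; decide
  by_cases h3 : c = '!'
  · subst h3; decide
  by_cases h4 : c = ':'
  · subst h4; decide
  by_cases h5 : c = 'A'
  · subst h5; decide
  by_cases h6 : c = 'B'
  · subst h6; decide
  by_cases h7 : c = 'C'
  · subst h7; decide
  by_cases h8 : c = 'D'
  · subst h8; decide
  by_cases h9 : c = 'E'
  · subst h9; decide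
  by_cases h10 : c = 'F'
  · subst h10; decide
  by_cases h11 : c = 'G'
  · subst h11; decide
  by_cases h12 : c = 'H'
  · subst h12; decide
  by_cases h13 : c = 'I'
  · subst h13; decide
  by_cases h14 : c = 'J'
  · subst h14; decide
  by_cases h15 : c = 'K'
  · subst h15; decide
  by_cases h16 : c = 'L'
  · subst h16; decide
  by_cases h17 : c = 'M'
  · subst h17; decide
  by_cases h18 : c = 'N'
  · subst h18; decide
  by_cases h19 : c = 'O'
  · subst h19; decide
  by_cases h20 : c = 'P'
  · subst h20; decide
  by_cases h21 : c = 'Q'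
  · subst h21; decide
  by_cases h22 : c = 'R'
  · subst h22; decide
  by_cases h23 : c = 'S'
  · subst h23; decide
  by_cases h24 : c = 'T'
  · subst h24; decide
  by_cases h25 : c = 'U'
  · subst h25; decide
  by_cases h26 : c = 'V'
  · subst h26; decide
  by_cases h27 : c = 'W'
  · subst h27; decide
  by_cases h28 : c = 'X'
  · subst h28; decide
  by_cases h29 : c = 'Y'
  · subst h29; decide
  by_cases h30 : c = 'Z'
  · subst h30; decide
  by_cases h31 : c = ' '
  · subst h31; decide
  simp [pvChunkA, pvValuesA, pvItemsA, pvTableBLit, PySem.Dict.get?, List.find?, hni,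
    h0, h1, h2, h3, h4, h5, h6, h7, h8, h9, h10, h11, h12, h13, h14, h15, h16, h17, h18, h19, h20, h21, h22, h23, h24, h25, h26, h27, h28, h29, h30, h31, beq_false_of_ne (Ne.symm h0), beq_false_of_ne (Ne.symm h1), beq_false_of_ne (Ne.symm h2), beq_false_of_ne (Ne.symm h3), beq_false_of_ne (Ne.symm h4), beq_false_of_ne (Ne.symm h5), beq_false_of_ne (Ne.symm h6), beq_false_of_ne (Ne.symm h7), beq_false_of_ne (Ne.symm h8), beq_false_of_ne (Ne.symm h9), beq_false_of_ne (Ne.symm h10), beq_false_of_ne (Ne.symm h11), beq_false_of_ne (Ne.symm h12), beq_false_of_ne (Ne.symm h13), beq_false_of_ne (Ne.symm h14), beq_false_of_ne (Ne.symm h15), beq_false_of_ne (Ne.symm h16), beq_false_of_ne (Ne.symm h17), beq_false_of_ne (Ne.symm h18), beq_false_of_ne (Ne.symm h19), beq_false_of_ne (Ne.symm h20), beq_false_of_ne (Ne.symm h21), beq_false_of_ne (Ne.symm h22), beq_false_of_ne (Ne.symm h23), beq_false_of_ne (Ne.symm h24), beq_false_of_ne (Ne.symm h25), beq_false_of_ne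 (Ne.symm h26), beq_false_of_ne (Ne.symm h27), beq_false_of_ne (Ne.symm h28), beq_false_of_ne (Ne.symm h29), beq_false_of_ne (Ne.symm h30), beq_false_of_ne (Ne.symm h31)]

-- ''.join with the empty separator is concatenation.
lemma pvJoinNil (l : List (List Char)) : (List.intersperse ([] : List Char) l).flatten = l.flatten := by
  induction l with
  | nil => rfl
  | cons x xs ih =>
    cases xs with
    | nil => rfl
    | cons y ys => simp_all [List.intersperse]

-- ===== VERDICT (by name: the statement is the Claim_ definition above) =====
set_option maxHeartbeats 2000000 in
theorem sequence_buttons_spec : Claim_equal_sequence_buttons := by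
  intro string _
  show sequence_buttons string = sequence_buttons_alt string
  have hA : sequence_buttons string
      = String.ofList ((PySem.Str.upper string).toList.flatMap pvChunkA) := by
    unfold sequence_buttons
    simp only [pvStepA]
    rw [PySem.List.foldl_append_eq_flatMap pvChunkA _ []]
    rfl
  have hB : (sequence_buttons_alt string).toList
      = (PySem.Str.upper string).toList.flatMap (fun c => ((pvTableB.get? c).getD "").toList) := by
    unfold sequence_buttons_alt
    rw [PySem.Str.toList_join]
    simp [PySem.Chars.join, List.intercalate, pvJoinNil, List.flatMap_def, Function.comp_def]
  have hT : (sequence_buttons string).toList = (sequence_buttons_alt string).toList := by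
    have hfun : pvChunkA = fun c => ((pvTableB.get? c).getD "").toList := funext pvPerChar
    rw [hA, hB, String.toList_ofList, hfun]
  exact String.toList_inj.mp hT
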